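-- pv_equiv track=rewrite | github.com/delalirc/faas_qa_automation | framework/utils/s2o_report_generator.py | _group_tests_by_category
-- ===== SOURCE A (Python) =====
-- def _group_tests_by_category(tests: list[dict]) -> dict[str, list[dict]]:
--     """Group tests by category based on test_id prefix."""
--     categories: dict[str, list[dict]] = {
--         "health": [],
--         "session": [],
--         "document": [],
--         "positive": [],
--         "negative": [],
--         "doc2data": [],
--     }
--
--     for t in tests:
--         tid = t.get("test_id", "").upper()
--         if "HC-" in tid or "health" in tid.lower():
--             categories["health"].append(t)
--         elif "SM-" in tid or "session" in tid.lower():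
--             categories["session"].append(t)
--         elif "DU-" in tid or "document" in tid.lower():
--             categories["document"].append(t)
--         elif "PJ-" in tid or "positive" in tid.lower():
--             categories["positive"].append(t)
--         elif "NF-" in tid or "negative" in tid.lower():
--             categories["negative"].append(t)
--         elif "DD-" in tid or "doc2data" in tid.lower():
--             categories["doc2data"].append(t)
--         else:
--             categories["health"].append(t)
--
--     return categories
-- ===== SOURCE B (Python) =====
-- _RULES = [
--     ("HC-", "health", "health"),
--     ("SM-", "session", "session"),
--     ("DU-", "document", "document"),
--     ("PJ-", "positive", "positive"),
--     ("NF-", "negative", "negative"),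
--     ("DD-", "doc2data", "doc2data"),
-- ]
-- _CATS = ["health", "session", "document", "positive", "negative", "doc2data"]
--
--
-- def _classify(t):
--     tid = t.get("test_id", "").upper()
--     low = tid.lower()
--     for prefix, keyword, cat in _RULES:
--         if prefix in tid or keyword in low:
--             return cat
--     return "health"
--
--
-- def _group_tests_by_category(tests: list[dict]) -> dict[str, list[dict]]:
--     """Group tests by category based on test_id prefix."""
--     return {c: [t for t in tests if _classify(t) == c] for c in _CATS}
-- ===== Notes on version B (the rewrite author's own statement) =====
-- stated objective: simpler
-- what changed: Replaces the single-pass if/elif chain that appends into a pre-initialised dict with a rule-table classifier plus a dict comprehension that filters the tests once per category.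
import Mathlib
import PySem

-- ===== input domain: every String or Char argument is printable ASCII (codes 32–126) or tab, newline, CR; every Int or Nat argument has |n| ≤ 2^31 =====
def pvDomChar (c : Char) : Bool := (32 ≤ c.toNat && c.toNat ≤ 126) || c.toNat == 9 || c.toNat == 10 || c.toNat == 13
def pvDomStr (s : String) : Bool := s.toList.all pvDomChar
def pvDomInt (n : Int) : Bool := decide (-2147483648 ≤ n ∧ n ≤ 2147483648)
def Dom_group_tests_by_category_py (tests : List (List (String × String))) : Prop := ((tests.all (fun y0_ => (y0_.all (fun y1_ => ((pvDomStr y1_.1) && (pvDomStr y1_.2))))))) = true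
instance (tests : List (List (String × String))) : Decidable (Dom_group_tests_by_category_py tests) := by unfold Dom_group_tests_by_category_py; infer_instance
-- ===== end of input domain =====

-- B replaces A's single-pass if/elif chain appending into a pre-initialised dict by a
-- rule-table classifier plus one filter of the test list per category (objective: simpler).

-- ===== PORT A =====
-- 'categories[cat].append(t)' is ported as Dict.modify cat [] (· ++ [t]); exact here because
-- every key the loop touches is one of the six pre-inserted keys, so no KeyError is reachable.
def group_tests_by_category_py (tests : List (List (String × String))) : List (String × List (List (String × String))) :=
  let categories : PySem.Dict String (List (List (String × String))) :=
    (((((PySem.Dict.empty.insert "health" []).insert "session" []).insert "document"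
        []).insert "positive" []).insert "negative" []).insert "doc2data" []
  let final := tests.foldl (fun cats t =>
    let tid := PySem.Str.upper ((PySem.Dict.mk t).getD "test_id" "")
    if PySem.Str.isIn "HC-" tid || PySem.Str.isIn "health" (PySem.Str.lower tid) then
      cats.modify "health" [] (fun l => l ++ [t])
    else if PySem.Str.isIn "SM-" tid || PySem.Str.isIn "session" (PySem.Str.lower tid) then
      cats.modify "session" [] (fun l => l ++ [t])
    else if PySem.Str.isIn "DU-" tid || PySem.Str.isIn "document" (PySem.Str.lower tid) then
      cats.modify "document" [] (fun l => l ++ [t])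
    else if PySem.Str.isIn "PJ-" tid || PySem.Str.isIn "positive" (PySem.Str.lower tid) then
      cats.modify "positive" [] (fun l => l ++ [t])
    else if PySem.Str.isIn "NF-" tid || PySem.Str.isIn "negative" (PySem.Str.lower tid) then
      cats.modify "negative" [] (fun l => l ++ [t])
    else if PySem.Str.isIn "DD-" tid || PySem.Str.isIn "doc2data" (PySem.Str.lower tid) then
      cats.modify "doc2data" [] (fun l => l ++ [t])
    else
      cats.modify "health" [] (fun l => l ++ [t])) categories
  final.items

-- ===== PORT B =====
def pvRules : List (String × String × String) :=
  [("HC-", "health", "health"), ("SM-", "session", "session"), ("DU-", "document", "document"),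
   ("PJ-", "positive", "positive"), ("NF-", "negative", "negative"), ("DD-", "doc2data", "doc2data")]

def pvCats : List String := ["health", "session", "document", "positive", "negative", "doc2data"]

def pvClassify (t : List (String × String)) : String :=
  let tid := PySem.Str.upper ((PySem.Dict.mk t).getD "test_id" "")
  let low := PySem.Str.lower tid
  match pvRules.find? (fun r => PySem.Str.isIn r.1 tid || PySem.Str.isIn r.2.1 low) with
  | some r => r.2.2
  | none => "health"

def group_tests_by_category_py_alt (tests : List (List (String × String))) : List (String × List (List (String × String))) :=
  pvCats.map (fun c => (c, tests.filter (fun t => pvClassify t == c)))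


-- ===== PRECONDITION & SPEC =====
def Spec_group_tests_by_category_py (tests : List (List (String × String))) (out : List (String × List (List (String × String)))) : Prop := out = group_tests_by_category_py_alt tests
instance (tests : List (List (String × String))) (out : List (String × List (List (String × String)))) : Decidable (Spec_group_tests_by_category_py tests out) := by unfold Spec_group_tests_by_category_py; infer_instance

-- ===== CLAIM (what is proved, stated in full; the proofs are below) =====
def Claim_equal_group_tests_by_category_py : Prop := ∀ (tests : List (List (String × String))), Dom_group_tests_by_category_py tests → Spec_group_tests_by_category_py tests (group_tests_by_category_py tests)

-- ===== LEMMAS AND PROOFS =====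

theorem pv_find_rules (p : String × String × String → Bool) :
    (match pvRules.find? p with | some r => r.2.2 | none => "health")
    = (if p ("HC-", "health", "health") then "health"
       else if p ("SM-", "session", "session") then "session"
       else if p ("DU-", "document", "document") then "document"
       else if p ("PJ-", "positive", "positive") then "positive"
       else if p ("NF-", "negative", "negative") then "negative"
       else if p ("DD-", "doc2data", "doc2data") then "doc2data"
       else "health") := by
  simp only [pvRules, List.find?_cons]
  cases p ("HC-", "health", "health") <;> cases p ("SM-", "session", "session") <;>
    cases p ("DU-", "document", "document") <;> cases p ("PJ-", "positive", "positive") <;>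
    cases p ("NF-", "negative", "negative") <;> cases p ("DD-", "doc2data", "doc2data") <;> rfl

theorem pvClassify_eq (t : List (String × String)) : pvClassify t =
    (let tid := PySem.Str.upper ((PySem.Dict.mk t).getD "test_id" "")
     if PySem.Str.isIn "HC-" tid || PySem.Str.isIn "health" (PySem.Str.lower tid) then "health"
     else if PySem.Str.isIn "SM-" tid || PySem.Str.isIn "session" (PySem.Str.lower tid) then "session"
     else if PySem.Str.isIn "DU-" tid || PySem.Str.isIn "document" (PySem.Str.lower tid) then "document"
     else if PySem.Str.isIn "PJ-" tid || PySem.Str.isIn "positive" (PySem.Str.lower tid) then "positive"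
     else if PySem.Str.isIn "NF-" tid || PySem.Str.isIn "negative" (PySem.Str.lower tid) then "negative"
     else if PySem.Str.isIn "DD-" tid || PySem.Str.isIn "doc2data" (PySem.Str.lower tid) then "doc2data"
     else "health") := by
  show (match pvRules.find? _ with | some r => r.2.2 | none => "health") = _
  rw [pv_find_rules]

theorem pv_classify_mem (t : List (String × String)) : pvClassify t ∈ pvCats := by
  rw [pvClassify_eq]
  dsimp only
  split_ifs <;> simp [pvCats]

def pvInit : PySem.Dict String (List (List (String × String))) :=
  (((((PySem.Dict.empty.insert "health" []).insert "session" []).insert "document"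
      []).insert "positive" []).insert "negative" []).insert "doc2data" []

theorem pv_step_eq (cats : PySem.Dict String (List (List (String × String))))
    (t : List (String × String)) :
    (let tid := PySem.Str.upper ((PySem.Dict.mk t).getD "test_id" "")
     if PySem.Str.isIn "HC-" tid || PySem.Str.isIn "health" (PySem.Str.lower tid) then
       cats.modify "health" [] (fun l => l ++ [t])
     else if PySem.Str.isIn "SM-" tid || PySem.Str.isIn "session" (PySem.Str.lower tid) then
       cats.modify "session" [] (fun l => l ++ [t])
     else if PySem.Str.isIn "DU-" tid || PySem.Str.isIn "document" (PySem.Str.lower tid) then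
       cats.modify "document" [] (fun l => l ++ [t])
     else if PySem.Str.isIn "PJ-" tid || PySem.Str.isIn "positive" (PySem.Str.lower tid) then
       cats.modify "positive" [] (fun l => l ++ [t])
     else if PySem.Str.isIn "NF-" tid || PySem.Str.isIn "negative" (PySem.Str.lower tid) then
       cats.modify "negative" [] (fun l => l ++ [t])
     else if PySem.Str.isIn "DD-" tid || PySem.Str.isIn "doc2data" (PySem.Str.lower tid) then
       cats.modify "doc2data" [] (fun l => l ++ [t])
     else
       cats.modify "health" [] (fun l => l ++ [t]))
    = cats.modify (pvClassify t) [] (fun l => l ++ [t]) := by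
  rw [pvClassify_eq]
  dsimp only
  split_ifs <;> rfl

theorem pv_keys_sub (tests : List (List (String × String))) :
    PySem.Set.update pvCats (tests.map pvClassify) = pvCats := by
  rw [PySem.Set.update_eq_append_filter]
  have h : (PySem.Set.ofList (tests.map pvClassify)).filter
      (fun y => !(PySem.Set.contains pvCats y)) = [] := by
    rw [List.filter_eq_nil_iff]
    intro y hy
    have hy' : y ∈ tests.map pvClassify := (PySem.Set.mem_ofList _ _).1 hy
    obtain ⟨t, _, rfl⟩ := List.mem_map.1 hy'
    rw [(PySem.Set.contains_iff pvCats (pvClassify t)).2 (pv_classify_mem t)]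
    simp
  rw [h, List.append_nil]

theorem pv_fold_items (tests : List (List (String × String))) :
    ((tests.map (fun t => (pvClassify t, t))).foldl
        (fun d p => d.modify p.1 [] (fun l => l ++ [p.2])) pvInit).items
      = pvCats.map (fun c => (c, tests.filter (fun t => pvClassify t == c))) := by
  have hnd : ((tests.map (fun t => (pvClassify t, t))).foldl
      (fun d p => d.modify p.1 [] (fun l => l ++ [p.2])) pvInit).keys.Nodup := by
    apply PySem.Dict.nodup_keys_foldl_modify_key (key := Prod.fst)
    decide
  have hkeys : ((tests.map (fun t => (pvClassify t, t))).foldl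
      (fun d p => d.modify p.1 [] (fun l => l ++ [p.2])) pvInit).keys = pvCats := by
    rw [PySem.Dict.keys_foldl_modify_key (key := Prod.fst)]
    have h1 : pvInit.keys = pvCats := by decide
    have h2 : (tests.map (fun t => (pvClassify t, t))).map Prod.fst = tests.map pvClassify := by
      simp [List.map_map, Function.comp_def]
    rw [h1, h2, pv_keys_sub]
  rw [PySem.Dict.items_eq_map_keys _ hnd ([] : List (List (String × String)))]
  rw [hkeys]
  apply List.map_congr_left
  intro c hc
  rw [PySem.Dict.getD_foldl_modify_append]
  have hinit : pvInit.getD c [] = [] := by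
    simp only [pvInit, PySem.Dict.getD_insert]
    split_ifs <;> rfl
  rw [hinit]
  simp [List.filter_map, List.map_map, Function.comp_def]

theorem pv_main (tests : List (List (String × String))) :
    group_tests_by_category_py tests = group_tests_by_category_py_alt tests := by
  have hfold : tests.foldl (fun cats t =>
      let tid := PySem.Str.upper ((PySem.Dict.mk t).getD "test_id" "")
      if PySem.Str.isIn "HC-" tid || PySem.Str.isIn "health" (PySem.Str.lower tid) then
        cats.modify "health" [] (fun l => l ++ [t])
      else if PySem.Str.isIn "SM-" tid || PySem.Str.isIn "session" (PySem.Str.lower tid) then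
        cats.modify "session" [] (fun l => l ++ [t])
      else if PySem.Str.isIn "DU-" tid || PySem.Str.isIn "document" (PySem.Str.lower tid) then
        cats.modify "document" [] (fun l => l ++ [t])
      else if PySem.Str.isIn "PJ-" tid || PySem.Str.isIn "positive" (PySem.Str.lower tid) then
        cats.modify "positive" [] (fun l => l ++ [t])
      else if PySem.Str.isIn "NF-" tid || PySem.Str.isIn "negative" (PySem.Str.lower tid) then
        cats.modify "negative" [] (fun l => l ++ [t])
      else if PySem.Str.isIn "DD-" tid || PySem.Str.isIn "doc2data" (PySem.Str.lower tid) then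
        cats.modify "doc2data" [] (fun l => l ++ [t])
      else
        cats.modify "health" [] (fun l => l ++ [t])) pvInit
      = (tests.map (fun t => (pvClassify t, t))).foldl
          (fun d p => d.modify p.1 [] (fun l => l ++ [p.2])) pvInit := by
    rw [List.foldl_map]
    exact List.foldl_ext _ _ pvInit (fun cats t _ => pv_step_eq cats t)
  show (tests.foldl (fun cats t =>
      let tid := PySem.Str.upper ((PySem.Dict.mk t).getD "test_id" "")
      if PySem.Str.isIn "HC-" tid || PySem.Str.isIn "health" (PySem.Str.lower tid) then
        cats.modify "health" [] (fun l => l ++ [t])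
      else if PySem.Str.isIn "SM-" tid || PySem.Str.isIn "session" (PySem.Str.lower tid) then
        cats.modify "session" [] (fun l => l ++ [t])
      else if PySem.Str.isIn "DU-" tid || PySem.Str.isIn "document" (PySem.Str.lower tid) then
        cats.modify "document" [] (fun l => l ++ [t])
      else if PySem.Str.isIn "PJ-" tid || PySem.Str.isIn "positive" (PySem.Str.lower tid) then
        cats.modify "positive" [] (fun l => l ++ [t])
      else if PySem.Str.isIn "NF-" tid || PySem.Str.isIn "negative" (PySem.Str.lower tid) then
        cats.modify "negative" [] (fun l => l ++ [t])
      else if PySem.Str.isIn "DD-" tid || PySem.Str.isIn "doc2data" (PySem.Str.lower tid) then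
        cats.modify "doc2data" [] (fun l => l ++ [t])
      else
        cats.modify "health" [] (fun l => l ++ [t])) pvInit).items
    = pvCats.map (fun c => (c, tests.filter (fun t => pvClassify t == c)))
  rw [hfold, pv_fold_items]

-- ===== VERDICT (by name: the statement is the Claim_ definition above) =====
theorem group_tests_by_category_py_spec : Claim_equal_group_tests_by_category_py := by
  intro tests _
  unfold Spec_group_tests_by_category_py
  exact pv_main tests
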